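-- pv_equiv track=rewrite | github.com/JonasSend/nmr_rain | commons.py | create_era_sets
-- ===== SOURCE A (Python) =====
-- from typing import List, Any
--
-- NR_FOLDS = 3
--
-- ERAS_TO_PURGE = 3
--
-- def create_era_sets(nr_eras: int) -> (List[List[int]], List[List[int]]):
--     eras_per_fold = round(nr_eras / NR_FOLDS)
--     era_sets_train = []
--     era_sets_validate = []
--
--     for i in range(NR_FOLDS):
--         if (i + 1) < NR_FOLDS:
--             era_sets_validate.append(list(range(eras_per_fold * i + 1, eras_per_fold * (i + 1) + 1)))
--         else:
--             era_sets_validate.append(list(range(eras_per_fold * i + 1, nr_eras + 1)))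
--         era_sets_train.append(list(range(1, max(1, eras_per_fold * i + 1 - ERAS_TO_PURGE))) +
--                               list(range(min(nr_eras + 1, eras_per_fold * (i + 1) + 1 + ERAS_TO_PURGE), nr_eras + 1)))
--
--     return era_sets_train, era_sets_validate
-- ===== SOURCE B (Python) =====
-- from typing import List, Any
--
-- NR_FOLDS = 3
--
-- ERAS_TO_PURGE = 3
--
-- def create_era_sets(nr_eras: int) -> (List[List[int]], List[List[int]]):
--     # Build each fold's (lo, hi) validation bounds once, then classify every
--     # era by a predicate: one filtered pass per list instead of concatenating
--     # clamped range() constructions.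
--     eras_per_fold = round(nr_eras / NR_FOLDS)
--     eras = range(1, nr_eras + 1)
--     bounds = [(i * eras_per_fold + 1, (i + 1) * eras_per_fold) for i in range(NR_FOLDS - 1)]
--     bounds.append(((NR_FOLDS - 1) * eras_per_fold + 1, nr_eras))
--     era_sets_validate = [[e for e in eras if lo <= e <= hi] for lo, hi in bounds]
--     era_sets_train = [[e for e in eras if e < lo - ERAS_TO_PURGE or e > hi + ERAS_TO_PURGE]
--                       for lo, hi in bounds]
--     return era_sets_train, era_sets_validate
-- ===== Notes on version B (the rewrite author's own statement) =====
-- stated objective: simpler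
-- what changed: B computes each fold's (lo,hi) bounds once and builds both era lists by filtering the full era range with a membership predicate, replacing A's per-fold construction of validate via range() and of train via concatenation of two clamped complement ranges with max/min arithmetic.
import Mathlib
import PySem

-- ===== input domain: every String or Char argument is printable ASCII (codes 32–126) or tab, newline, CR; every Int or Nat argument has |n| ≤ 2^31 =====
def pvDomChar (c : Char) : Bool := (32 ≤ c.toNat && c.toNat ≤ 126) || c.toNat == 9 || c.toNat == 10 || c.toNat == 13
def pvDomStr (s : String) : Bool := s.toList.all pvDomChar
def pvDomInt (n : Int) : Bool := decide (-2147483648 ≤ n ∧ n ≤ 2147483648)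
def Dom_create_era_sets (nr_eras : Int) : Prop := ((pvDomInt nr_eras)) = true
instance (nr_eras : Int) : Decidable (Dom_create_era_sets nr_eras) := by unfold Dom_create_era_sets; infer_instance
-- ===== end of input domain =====

-- B builds both era lists of each fold by filtering the full era range with a
-- bounds predicate instead of A's range()-construction with max/min clamps (objective: simpler).

-- shared helper for Python's `round(n / 3)` (NR_FOLDS = 3): on |n| ≤ 2^31 the
-- double n/3 is within 1e-7 of the exact rational, which is never a half-integer
-- (its fractional part is 0, 1/3 or 2/3), so round gives the integer nearest to
-- n/3, which equals floor((n+1)/3). Exact on the stated domain.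
def pyRound_div3 (n : Int) : Int := PySem.Int.floordiv (n + 1) 3

-- ===== PORT A =====
def create_era_sets (nr_eras : Int) : List (List Int) × List (List Int) :=
  let eras_per_fold := pyRound_div3 nr_eras
  let r := (PySem.List.pyRange 0 3 1).foldl (fun st i =>
    let va :=
      if i + 1 < 3 then
        st.2 ++ [PySem.List.pyRange (eras_per_fold * i + 1) (eras_per_fold * (i + 1) + 1) 1]
      else
        st.2 ++ [PySem.List.pyRange (eras_per_fold * i + 1) (nr_eras + 1) 1]
    let tr := st.1 ++ [PySem.List.pyRange 1 (max 1 (eras_per_fold * i + 1 - 3)) 1 ++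
        PySem.List.pyRange (min (nr_eras + 1) (eras_per_fold * (i + 1) + 1 + 3)) (nr_eras + 1) 1]
    (tr, va)) (([], []) : List (List Int) × List (List Int))
  (r.1, r.2)

-- ===== PORT B =====
def create_era_sets_alt (nr_eras : Int) : List (List Int) × List (List Int) :=
  let eras_per_fold := pyRound_div3 nr_eras
  let eras := PySem.List.pyRange 1 (nr_eras + 1) 1
  let bounds := ((PySem.List.pyRange 0 (3 - 1) 1).map
      (fun i => (i * eras_per_fold + 1, (i + 1) * eras_per_fold)))
      ++ [((3 - 1) * eras_per_fold + 1, nr_eras)]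
  let era_sets_validate := bounds.map (fun b =>
      eras.filter (fun e => decide (b.1 ≤ e) && decide (e ≤ b.2)))
  let era_sets_train := bounds.map (fun b =>
      eras.filter (fun e => decide (e < b.1 - 3) || decide (b.2 + 3 < e)))
  (era_sets_train, era_sets_validate)

-- ===== PRECONDITION & SPEC =====
def Spec_create_era_sets (nr_eras : Int) (out : List (List Int) × List (List Int)) : Prop := out = create_era_sets_alt nr_eras
instance (nr_eras : Int) (out : List (List Int) × List (List Int)) : Decidable (Spec_create_era_sets nr_eras out) := by unfold Spec_create_era_sets; infer_instance

-- ===== CLAIM (what is proved, stated in full; the proofs are below) =====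
def Claim_equal_create_era_sets : Prop := ∀ (nr_eras : Int), Dom_create_era_sets nr_eras → Spec_create_era_sets nr_eras (create_era_sets nr_eras)

-- ===== LEMMAS AND PROOFS =====

-- two strictly increasing integer lists with the same members are equal
theorem pv_eq_of_pairwise_lt_of_mem_iff (xs : List Int) : ∀ (ys : List Int),
    xs.Pairwise (· < ·) → ys.Pairwise (· < ·) → (∀ a, a ∈ xs ↔ a ∈ ys) → xs = ys := by
  induction xs with
  | nil =>
    intro ys _ _ h
    cases ys with
    | nil => rfl
    | cons b ys => exact absurd ((h b).2 (List.mem_cons_self ..)) (List.not_mem_nil)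
  | cons a xs ih =>
    intro ys hx hy h
    cases ys with
    | nil => exact absurd ((h a).1 (List.mem_cons_self ..)) (List.not_mem_nil)
    | cons b ys =>
      obtain ⟨hxa, hxt⟩ := List.pairwise_cons.1 hx
      obtain ⟨hyb, hyt⟩ := List.pairwise_cons.1 hy
      have ha := (h a).1 (List.mem_cons_self ..)
      have hb := (h b).2 (List.mem_cons_self ..)
      have hab : a = b := by
        rcases List.mem_cons.1 ha with h1 | h1
        · exact h1
        · rcases List.mem_cons.1 hb with h2 | h2
          · exact h2.symm
          · have := hxa _ h2
            have := hyb _ h1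
            omega
      subst hab
      have htl : ∀ c, c ∈ xs ↔ c ∈ ys := by
        intro c
        constructor
        · intro hc
          rcases List.mem_cons.1 ((h c).1 (List.mem_cons_of_mem _ hc)) with h1 | h1
          · exact absurd (hxa _ hc) (by omega)
          · exact h1
        · intro hc
          rcases List.mem_cons.1 ((h c).2 (List.mem_cons_of_mem _ hc)) with h1 | h1
          · exact absurd (hyb _ hc) (by omega)
          · exact h1
      rw [ih ys hxt hyt htl]

theorem pv_main (n : Int) : create_era_sets n = create_era_sets_alt n := by
  unfold create_era_sets create_era_sets_alt pyRound_div3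
  have h3 : PySem.List.pyRange 0 3 1 = [0, 1, 2] := by decide
  have h2 : PySem.List.pyRange 0 (3 - 1) 1 = [0, 1] := by decide
  obtain ⟨hb1, hb2⟩ := (PySem.Int.floordiv_eq_iff_of_pos (a := n + 1) (b := 3)
      (q := PySem.Int.floordiv (n + 1) 3) (by norm_num)).1 rfl
  set q := PySem.Int.floordiv (n + 1) 3 with hq
  rw [h3, h2]
  simp only [List.foldl, List.map, List.cons_append, List.nil_append]
  norm_num
  refine ⟨⟨?_, ?_, ?_⟩, ?_, ?_, ?_⟩ <;>
  · apply pv_eq_of_pairwise_lt_of_mem_iff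
    · first
      | exact PySem.List.pairwise_lt_pyRange_one ..
      | · refine List.pairwise_append.2 ⟨PySem.List.pairwise_lt_pyRange_one ..,
            PySem.List.pairwise_lt_pyRange_one .., ?_⟩
          intro x hxm y hym
          rw [PySem.List.mem_pyRange_one] at hxm hym
          omega
    · exact List.Pairwise.filter _ (PySem.List.pairwise_lt_pyRange_one ..)
    · intro a
      simp only [List.mem_filter, List.mem_append, PySem.List.mem_pyRange_one,
        Bool.and_eq_true, Bool.or_eq_true, decide_eq_true_eq]
      omega

-- ===== VERDICT (by name: the statement is the Claim_ definition above) =====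
theorem create_era_sets_spec : Claim_equal_create_era_sets := by
  intro n _
  unfold Spec_create_era_sets
  exact pv_main n
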